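-- pv_equiv track=rewrite | github.com/jcmgray/quimb | quimb/tensor/tensor_arbgeom.py | gloop_remove_dangling
-- ===== SOURCE A (Python) =====
-- def gloop_remove_dangling(sites, neighbors, where=()):
--     """Given cluster `sites` and edges given by the `neighbors` mapping, remove
--     all sites that are not connected to at least two other sites, reducing it
--     in this way to a generalised loop.
--
--     Parameters
--     ----------
--     sites : sequence[hashable]
--         The sites in the original cluster.
--     neighbors : dict[hashable, sequence[hashable]]
--         The neighbors of each site.
--     where : sequence[hashable], optional
--         The sites to keep, even if they are dangling.
--
--     Returns
--     -------
--     frozenset[hashable]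
--     """
--     sites = list(sites)
--     i = 0
--     while i < len(sites):
--         # check next site
--         site = sites[i]
--         # can only reduce non target sites
--         if site not in where:
--             num_neighbors = sum(nsite in sites for nsite in neighbors[site])
--             if num_neighbors < 2:
--                 # dangling -> remove!
--                 sites.pop(i)
--                 # back to beginning
--                 i = -1
--         i += 1
--     return frozenset(sites)
-- ===== SOURCE B (Python) =====
-- def gloop_remove_dangling(sites, neighbors, where=()):
--     """Reduce the cluster to a generalised loop by repeatedly filtering out,
--     in whole passes, every site with fewer than two in-cluster neighbors
--     (except sites in `where`), until a pass removes nothing."""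
--     cur = list(sites)
--     keep_always = set(where)
--     while True:
--         support = set(cur)
--         new = [
--             s for s in cur
--             if s in keep_always
--             or sum(n in support for n in neighbors[s]) >= 2
--         ]
--         if len(new) == len(cur):
--             return frozenset(cur)
--         cur = new
-- ===== Notes on version B (the rewrite author's own statement) =====
-- stated objective: alternative
-- what changed: B replaces A's remove-one-site-then-restart-the-whole-scan-from-index-0 loop by whole passes that simultaneously filter out every dangling site (with hash-set membership for the cluster and for `where`), iterated until a pass removes nothing; both reach the same unique reduced cluster.
import Mathlib
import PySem

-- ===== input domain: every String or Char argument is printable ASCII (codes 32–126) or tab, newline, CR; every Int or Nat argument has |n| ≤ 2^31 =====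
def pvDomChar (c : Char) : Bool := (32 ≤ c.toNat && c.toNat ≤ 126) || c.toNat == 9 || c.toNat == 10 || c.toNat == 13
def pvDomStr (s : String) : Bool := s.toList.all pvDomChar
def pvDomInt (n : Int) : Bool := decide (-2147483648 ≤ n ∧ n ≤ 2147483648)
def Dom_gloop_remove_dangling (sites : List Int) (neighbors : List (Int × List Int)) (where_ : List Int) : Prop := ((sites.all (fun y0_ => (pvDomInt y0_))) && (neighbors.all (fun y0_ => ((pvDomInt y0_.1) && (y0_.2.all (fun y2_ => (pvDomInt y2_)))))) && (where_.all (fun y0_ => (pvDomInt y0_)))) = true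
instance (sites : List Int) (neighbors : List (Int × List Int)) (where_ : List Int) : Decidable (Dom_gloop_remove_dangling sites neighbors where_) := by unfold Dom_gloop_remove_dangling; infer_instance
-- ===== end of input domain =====

-- B replaces A's remove-one-site-then-restart-the-whole-scan loop by whole-pass simultaneous
-- filtering (with set-based membership) iterated to a fixed point; same return value (alternative).

-- neighbors[s]: first-match association-list lookup; `none` (Python KeyError) is excluded by
-- Pre_gloop_remove_dangling, so the `[]` default is never the value used on admitted inputs.
def pvNbrs (neighbors : List (Int × List Int)) (s : Int) : List Int :=
  (neighbors.lookup s).getD []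

-- ===== PORT A =====
-- the `while i < len(sites)` loop; `sites.pop(i); i = -1` followed by `i += 1` re-enters with i = 0
def gloopA_go (neighbors : List (Int × List Int)) (where_ : List Int) (sites : List Int) (i : Nat) : List Int :=
  if h : i < sites.length then
    let site := sites[i]
    if site ∈ where_ then
      gloopA_go neighbors where_ sites (i + 1)
    else
      let num_neighbors := (pvNbrs neighbors site).countP (fun nsite => decide (nsite ∈ sites))
      if num_neighbors < 2 then
        gloopA_go neighbors where_ (sites.eraseIdx i) 0
      else
        gloopA_go neighbors where_ sites (i + 1)
  else
    sites
termination_by (sites.length, sites.length - i)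
decreasing_by
  · right; omega
  · left; simp only [List.length_eraseIdx, h, if_pos]; omega
  · right; omega

def gloop_remove_dangling (sites : List Int) (neighbors : List (Int × List Int)) (where_ : List Int) : List Int :=
  PySem.Set.ofList (gloopA_go neighbors where_ sites 0)

-- ===== PORT B =====
def pvKeepB (neighbors : List (Int × List Int)) (keep_always : PySem.Set Int) (support : PySem.Set Int) (s : Int) : Bool :=
  PySem.Set.contains keep_always s || 2 ≤ (pvNbrs neighbors s).countP (fun n => PySem.Set.contains support n)

-- one pass: `support = set(cur)`, then the list comprehension over `cur`
def gloopB_step (neighbors : List (Int × List Int)) (keep_always : PySem.Set Int) (cur : List Int) : List Int :=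
  cur.filter (fun s => pvKeepB neighbors keep_always (PySem.Set.ofList cur) s)

def gloopB_go (neighbors : List (Int × List Int)) (keep_always : PySem.Set Int) (cur : List Int) : List Int :=
  if _h : (gloopB_step neighbors keep_always cur).length = cur.length then cur
  else gloopB_go neighbors keep_always (gloopB_step neighbors keep_always cur)
termination_by cur.length
decreasing_by
  have hle : (gloopB_step neighbors keep_always cur).length ≤ cur.length :=
    List.length_filter_le _ _
  omega

def gloop_remove_dangling_alt (sites : List Int) (neighbors : List (Int × List Int)) (where_ : List Int) : List Int :=
  PySem.Set.ofList (gloopB_go neighbors (PySem.Set.ofList where_) sites)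

-- ===== PRECONDITION & SPEC =====
-- Pre_ excludes exactly the inputs on which A raises KeyError: a site outside `where_`
-- whose neighbor list is missing from `neighbors` (every such site is eventually looked up).
def Pre_gloop_remove_dangling (sites : List Int) (neighbors : List (Int × List Int)) (where_ : List Int) : Prop :=
  ∀ s ∈ sites, s ∉ where_ → (neighbors.lookup s).isSome
instance (sites : List Int) (neighbors : List (Int × List Int)) (where_ : List Int) : Decidable (Pre_gloop_remove_dangling sites neighbors where_) := by unfold Pre_gloop_remove_dangling; infer_instance

def pvWitness_gloop_remove_dangling : List Int × (List (Int × List Int)) × List Int :=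
  ([1, 2, 3, 4], [(1, [2, 3]), (2, [1, 3]), (3, [1, 2, 4]), (4, [3])], [])

def Spec_gloop_remove_dangling (sites : List Int) (neighbors : List (Int × List Int)) (where_ : List Int) (out : List Int) : Prop := out = gloop_remove_dangling_alt sites neighbors where_
instance (sites : List Int) (neighbors : List (Int × List Int)) (where_ : List Int) (out : List Int) : Decidable (Spec_gloop_remove_dangling sites neighbors where_ out) := by unfold Spec_gloop_remove_dangling; infer_instance

-- ===== CLAIM (what is proved, stated in full; the proofs are below) =====
def Claim_equal_gloop_remove_dangling : Prop := ∀ (sites : List Int) (neighbors : List (Int × List Int)) (where_ : List Int), Dom_gloop_remove_dangling sites neighbors where_ → Pre_gloop_remove_dangling sites neighbors where_ → Spec_gloop_remove_dangling sites neighbors where_ (gloop_remove_dangling sites neighbors where_)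

-- ===== LEMMAS AND PROOFS =====

-- `keep l s`: site s survives a check against the current cluster list l
def pvKeep (neighbors : List (Int × List Int)) (where_ : List Int) (l : List Int) (s : Int) : Bool :=
  decide (s ∈ where_) || 2 ≤ (pvNbrs neighbors s).countP (fun n => decide (n ∈ l))

-- canonical peeling: repeatedly erase the first non-kept site
def pvPeel (neighbors : List (Int × List Int)) (where_ : List Int) (l : List Int) : List Int :=
  match hfi : l.findIdx? (fun s => !pvKeep neighbors where_ l s) with
  | none => l
  | some j => pvPeel neighbors where_ (l.eraseIdx j)
termination_by l.length
decreasing_by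
  obtain ⟨hj, -, -⟩ := List.findIdx?_eq_some_iff_getElem.mp hfi
  simp only [List.length_eraseIdx, hj, if_pos]; omega

theorem pvKeep_anti (neighbors : List (Int × List Int)) (where_ : List Int) {l l' : List Int}
    (hsub : ∀ x, x ∈ l' → x ∈ l) (s : Int)
    (h : pvKeep neighbors where_ l s = false) : pvKeep neighbors where_ l' s = false := by
  unfold pvKeep at *
  simp only [Bool.or_eq_false_iff, decide_eq_false_iff_not] at *
  obtain ⟨h1, h2⟩ := h
  refine ⟨h1, ?_⟩
  have := List.countP_mono_left (l := pvNbrs neighbors s)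
      (p := fun n => decide (n ∈ l')) (q := fun n => decide (n ∈ l))
      (by intro x _ hx; simp only [decide_eq_true_eq] at *; exact hsub x hx)
  omega

theorem pvEraseIdx_comm {α : Type} : ∀ (l : List α) (a b : Nat), a < b →
    (l.eraseIdx a).eraseIdx (b - 1) = (l.eraseIdx b).eraseIdx a := by
  intro l
  induction l with
  | nil => intro a b _; simp
  | cons x xs ih =>
    intro a b hab
    match a, b with
    | 0, b + 1 => simp [List.eraseIdx]
    | a + 1, b + 1 =>
      have hab' : a < b := by omega
      have hb : 0 < b := by omega
      simp only [List.eraseIdx]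
      have hsub : b + 1 - 1 = (b - 1) + 1 := by omega
      rw [hsub]
      simp only [List.eraseIdx]
      rw [ih a b hab']

theorem pvPeel_none (neighbors : List (Int × List Int)) (where_ : List Int) (l : List Int)
    (h : l.findIdx? (fun s => !pvKeep neighbors where_ l s) = none) :
    pvPeel neighbors where_ l = l := by
  rw [pvPeel]; split <;> simp_all

theorem pvPeel_some (neighbors : List (Int × List Int)) (where_ : List Int) (l : List Int) (j : Nat)
    (h : l.findIdx? (fun s => !pvKeep neighbors where_ l s) = some j) :
    pvPeel neighbors where_ l = pvPeel neighbors where_ (l.eraseIdx j) := by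
  rw [pvPeel]; split <;> simp_all

theorem pvPeel_eraseIdx (neighbors : List (Int × List Int)) (where_ : List Int) :
    ∀ (n : Nat) (l : List Int), l.length ≤ n → ∀ (j : Nat) (hj : j < l.length),
    pvKeep neighbors where_ l l[j] = false →
    pvPeel neighbors where_ l = pvPeel neighbors where_ (l.eraseIdx j) := by
  intro n
  induction n with
  | zero => intro l hlen j hj _; omega
  | succ n ih =>
    intro l hlen j hj hkeep
    cases h0 : l.findIdx? (fun s => !pvKeep neighbors where_ l s) with
    | none =>
      have hall := List.findIdx?_eq_none_iff.mp h0
      have := hall l[j] (l.getElem_mem hj)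
      simp [hkeep] at this
    | some j0 =>
      obtain ⟨hj0, hpj0, hmin⟩ := List.findIdx?_eq_some_iff_getElem.mp h0
      rw [pvPeel_some _ _ _ _ h0]
      by_cases hjj : j = j0
      · subst hjj; rfl
      · have hlt : j0 < j := by
          rcases Nat.lt_or_ge j j0 with hcase | hcase
          · have := hmin j hcase; simp [hkeep] at this
          · omega
        have hsub1 : ∀ x, x ∈ l.eraseIdx j0 → x ∈ l := fun x => List.mem_of_mem_eraseIdx
        have hlen1 : (l.eraseIdx j0).length = l.length - 1 := by
          simp [List.length_eraseIdx, hj0]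
        have hb1 : j - 1 < (l.eraseIdx j0).length := by omega
        have hget1 : (l.eraseIdx j0)[j-1]'hb1 = l[j] := by
          rw [List.getElem_eraseIdx, dif_neg (by omega)]
          exact getElem_congr rfl (by omega) (by omega)
        have hk1 : pvKeep neighbors where_ (l.eraseIdx j0) ((l.eraseIdx j0)[j-1]'hb1) = false := by
          rw [hget1]; exact pvKeep_anti neighbors where_ hsub1 _ hkeep
        have e1 := ih (l.eraseIdx j0) (by omega) (j - 1) hb1 hk1
        have hsub2 : ∀ x, x ∈ l.eraseIdx j → x ∈ l := fun x => List.mem_of_mem_eraseIdx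
        have hlen2 : (l.eraseIdx j).length = l.length - 1 := by
          simp [List.length_eraseIdx, hj]
        have hb2 : j0 < (l.eraseIdx j).length := by omega
        have hget2 : (l.eraseIdx j)[j0]'hb2 = l[j0] := by
          rw [List.getElem_eraseIdx, dif_pos hlt]
        have hk2 : pvKeep neighbors where_ (l.eraseIdx j) ((l.eraseIdx j)[j0]'hb2) = false := by
          rw [hget2]
          exact pvKeep_anti neighbors where_ hsub2 _ (by simpa using hpj0)
        have e2 := ih (l.eraseIdx j) (by omega) j0 hb2 hk2
        rw [e1, e2, pvEraseIdx_comm l j0 j hlt]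

theorem pvPeel_filter (neighbors : List (Int × List Int)) (where_ : List Int) :
    ∀ (n : Nat) (l : List Int) (p : Int → Bool), l.length ≤ n →
    (∀ s ∈ l, p s = false → pvKeep neighbors where_ l s = false) →
    pvPeel neighbors where_ l = pvPeel neighbors where_ (l.filter p) := by
  intro n
  induction n with
  | zero =>
    intro l p hlen _
    have : l = [] := List.eq_nil_of_length_eq_zero (by omega)
    subst this; simp
  | succ n ih =>
    intro l p hlen hp
    cases h0 : l.findIdx? (fun s => !p s) with
    | none =>
      have hall := List.findIdx?_eq_none_iff.mp h0
      rw [List.filter_eq_self.mpr (fun a ha => by simpa using hall a ha)]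
    | some j =>
      obtain ⟨hj, hpj, -⟩ := List.findIdx?_eq_some_iff_getElem.mp h0
      have hpj' : p l[j] = false := by simpa using hpj
      have hkj : pvKeep neighbors where_ l l[j] = false :=
        hp _ (l.getElem_mem hj) hpj'
      rw [pvPeel_eraseIdx neighbors where_ (n + 1) l hlen j hj hkj]
      have hfilter : l.filter p = (l.eraseIdx j).filter p := by
        conv_lhs => rw [← List.take_append_drop j l]
        rw [List.eraseIdx_eq_take_drop_succ, List.filter_append, List.filter_append]
        congr 1
        conv_lhs => rw [← List.getElem_cons_drop hj]
        rw [List.filter_cons, hpj']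
        simp
      rw [hfilter]
      exact ih (l.eraseIdx j) p
        (by rw [List.length_eraseIdx]; simp [hj]; omega)
        (fun s hs hps => pvKeep_anti neighbors where_ (fun x => List.mem_of_mem_eraseIdx) _
          (hp s (List.mem_of_mem_eraseIdx hs) hps))

theorem gloopA_go_eq (neighbors : List (Int × List Int)) (where_ : List Int) :
    ∀ (l : List Int) (i : Nat),
    (∀ (k : Nat), k < i → (hk : k < l.length) → pvKeep neighbors where_ l l[k] = true) →
    gloopA_go neighbors where_ l i = pvPeel neighbors where_ l := by
  intro l i
  induction l, i using gloopA_go.induct (neighbors := neighbors) (where_ := where_) with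
  | case1 l i h site hw ih =>
    intro hinv
    rw [gloopA_go.eq_def]
    have hw' : l[i] ∈ where_ := hw
    simp only [dif_pos h]
    rw [if_pos hw']
    exact ih (fun k hk hkl => by
      rcases Nat.lt_or_ge k i with h' | h'
      · exact hinv k h' hkl
      · have hki : k = i := by omega
        subst hki
        unfold pvKeep
        simp only [Bool.or_eq_true, decide_eq_true_eq]
        exact Or.inl hw)
  | case2 l i h site hw num hnum ih =>
    intro hinv
    rw [gloopA_go.eq_def]
    have hw' : l[i] ∉ where_ := hw
    have hnum' : List.countP (fun nsite => decide (nsite ∈ l)) (pvNbrs neighbors l[i]) < 2 := hnum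
    simp only [dif_pos h]
    rw [if_neg hw', if_pos hnum']
    have hkeep : pvKeep neighbors where_ l l[i] = false := by
      unfold pvKeep
      simp only [Bool.or_eq_false_iff, decide_eq_false_iff_not]
      exact ⟨hw, by simp only [Nat.not_le]; exact hnum⟩
    have hfind : l.findIdx? (fun s => !pvKeep neighbors where_ l s) = some i :=
      List.findIdx?_eq_some_iff_getElem.mpr
        ⟨h, by simp [hkeep], fun k hk => by simp [hinv k hk (Nat.lt_trans hk h)]⟩
    rw [pvPeel_some _ _ _ _ hfind]
    exact ih (fun k hk _ => absurd hk (Nat.not_lt_zero k))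
  | case3 l i h site hw num hnum ih =>
    intro hinv
    rw [gloopA_go.eq_def]
    have hw' : l[i] ∉ where_ := hw
    have hnum' : ¬ List.countP (fun nsite => decide (nsite ∈ l)) (pvNbrs neighbors l[i]) < 2 := hnum
    simp only [dif_pos h]
    rw [if_neg hw', if_neg hnum']
    exact ih (fun k hk hkl => by
      rcases Nat.lt_or_ge k i with h' | h'
      · exact hinv k h' hkl
      · have hki : k = i := by omega
        subst hki
        unfold pvKeep
        simp only [Bool.or_eq_true, decide_eq_true_eq]
        exact Or.inr (Nat.le_of_not_lt hnum))
  | case4 l i h =>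
    intro hinv
    rw [gloopA_go.eq_def]
    simp only [dif_neg h]
    refine (pvPeel_none neighbors where_ l (List.findIdx?_eq_none_iff.mpr ?_)).symm
    intro x hx
    obtain ⟨k, hk, rfl⟩ := List.mem_iff_getElem.mp hx
    simp [hinv k (by omega) hk]

theorem gloopB_go_eq (neighbors : List (Int × List Int)) (where_ : List Int) :
    ∀ (n : Nat) (l : List Int), l.length ≤ n →
    gloopB_go neighbors (PySem.Set.ofList where_) l = pvPeel neighbors where_ l := by
  intro n
  induction n with
  | zero =>
    intro l hlen
    have hnil : l = [] := List.eq_nil_of_length_eq_zero (by omega)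
    subst hnil
    rw [gloopB_go.eq_def, dif_pos (by rfl),
      pvPeel_none neighbors where_ [] (by simp)]
  | succ n ih =>
    intro l hlen
    have hbridge : ∀ s, pvKeepB neighbors (PySem.Set.ofList where_) (PySem.Set.ofList l) s
        = pvKeep neighbors where_ l s := by
      intro s
      unfold pvKeepB pvKeep
      have h1 : PySem.Set.contains (PySem.Set.ofList where_) s = decide (s ∈ where_) := by
        simp [PySem.Set.contains, PySem.Set.mem_ofList]
      have h2 : (fun m => PySem.Set.contains (PySem.Set.ofList l) m) = (fun m => decide (m ∈ l)) :=
        funext fun y => by simp [PySem.Set.contains, PySem.Set.mem_ofList]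
      rw [h1, h2]
    have hstep : gloopB_step neighbors (PySem.Set.ofList where_) l
        = l.filter (pvKeep neighbors where_ l) := by
      unfold gloopB_step
      exact List.filter_congr (fun x _ => hbridge x)
    by_cases hlen2 : (gloopB_step neighbors (PySem.Set.ofList where_) l).length = l.length
    · rw [gloopB_go.eq_def, dif_pos hlen2]
      have hall : ∀ x ∈ l, pvKeep neighbors where_ l x = true :=
        List.length_filter_eq_length_iff.mp (by rw [← hstep]; exact hlen2)
      exact (pvPeel_none neighbors where_ l
        (List.findIdx?_eq_none_iff.mpr (fun x hx => by simp [hall x hx]))).symm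
    · have hlt : (gloopB_step neighbors (PySem.Set.ofList where_) l).length < l.length :=
        lt_of_le_of_ne (hstep ▸ List.length_filter_le _ _) hlen2
      rw [gloopB_go.eq_def, dif_neg hlen2,
        ih (gloopB_step neighbors (PySem.Set.ofList where_) l) (by omega), hstep]
      exact (pvPeel_filter neighbors where_ l.length l (pvKeep neighbors where_ l)
        le_rfl (fun s _ hs => hs)).symm

-- ===== VERDICT (by name: the statement is the Claim_ definition above) =====
theorem gloop_remove_dangling_spec : Claim_equal_gloop_remove_dangling := by
  intro sites neighbors where_ _hdom _hpre
  unfold Spec_gloop_remove_dangling gloop_remove_dangling gloop_remove_dangling_alt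
  rw [gloopA_go_eq neighbors where_ sites 0 (by omega),
      gloopB_go_eq neighbors where_ sites.length sites le_rfl]
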